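-- pv_equiv track=rewrite | github.com/7-yaya/SyncPool | disambiguating.py | resolve_collision
-- ===== SOURCE A (Python) =====
-- from typing import List, Optional, Tuple, Dict
--
-- def resolve_collision(tokens: List[str]) -> List[int]:
--     indices = []
--     for i in range(len(tokens)):
--         for j in range(len(tokens)):
--             if i == j:
--                 continue
--             if tokens[j].startswith(tokens[i]):
--                 break
--         else:
--             indices.append(i)
--     return indices
-- ===== SOURCE B (Python) =====
-- def resolve_collision(tokens):
--     n = len(tokens)
--     order = sorted(range(n), key=lambda i: tokens[i])
--     keep = []
--     for k in range(n):
--         i = order[k]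
--         t = tokens[i]
--         if k + 1 < n and tokens[order[k + 1]].startswith(t):
--             continue
--         if k > 0 and tokens[order[k - 1]] == t:
--             continue
--         keep.append(i)
--     return sorted(keep)
-- ===== Notes on version B (the rewrite author's own statement) =====
-- stated objective: faster
-- what changed: Replaces the all-pairs prefix scan by sorting the indices lexicographically by token and checking each token only against its immediate sorted neighbours (next for a proper-prefix extension, previous for a duplicate), then sorting the kept indices.
import Mathlib
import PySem

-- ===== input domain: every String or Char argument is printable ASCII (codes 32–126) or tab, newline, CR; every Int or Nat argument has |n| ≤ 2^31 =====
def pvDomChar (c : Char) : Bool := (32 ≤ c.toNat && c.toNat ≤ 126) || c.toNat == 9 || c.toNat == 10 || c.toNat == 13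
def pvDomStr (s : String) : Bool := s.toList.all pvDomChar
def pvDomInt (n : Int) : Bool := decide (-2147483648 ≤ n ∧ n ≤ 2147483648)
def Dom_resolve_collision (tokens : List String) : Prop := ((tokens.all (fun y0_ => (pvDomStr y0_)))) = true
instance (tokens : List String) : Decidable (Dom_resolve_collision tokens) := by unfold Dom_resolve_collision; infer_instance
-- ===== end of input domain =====

-- B replaces A's all-pairs prefix scan by one lexicographic sort of the indices plus a
-- neighbour check in sorted order (objective: faster).

-- ===== PORT A =====
-- A: for each i, keep i unless some other token starts with tokens[i] (for-else with break ≡ all).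
def resolve_collision (tokens : List String) : List Int :=
  (PySem.List.pyRange 0 (tokens.length : Int)).foldl
    (fun indices i =>
      if (PySem.List.pyRange 0 (tokens.length : Int)).all (fun j =>
            decide (i = j) ||
            !(PySem.Str.startswith (PySem.List.pyGetD tokens j "") (PySem.List.pyGetD tokens i "")))
      then indices ++ [i] else indices)
    []

-- ===== PORT B =====
-- B: sort indices by token; a token is dropped iff its sorted successor extends it or its
-- sorted predecessor equals it; finally sort the kept indices.
def resolve_collision_alt (tokens : List String) : List Int :=
  let n : Int := tokens.length
  let order := PySem.List.sorted (PySem.List.pyRange 0 n) (fun i => PySem.List.pyGetD tokens i "")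
  let keep := (PySem.List.pyRange 0 n).foldl
    (fun keep k =>
      if k + 1 < n ∧ PySem.Str.startswith
            (PySem.List.pyGetD tokens (PySem.List.pyGetD order (k + 1) 0) "")
            (PySem.List.pyGetD tokens (PySem.List.pyGetD order k 0) "") = true then keep
      else if 0 < k ∧ PySem.List.pyGetD tokens (PySem.List.pyGetD order (k - 1) 0) ""
              = PySem.List.pyGetD tokens (PySem.List.pyGetD order k 0) "" then keep
      else keep ++ [PySem.List.pyGetD order k 0])
    []
  PySem.List.sorted keep (fun x => x)

-- ===== PRECONDITION & SPEC =====
def Spec_resolve_collision (tokens : List String) (out : List Int) : Prop := out = resolve_collision_alt tokens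
instance (tokens : List String) (out : List Int) : Decidable (Spec_resolve_collision tokens out) := by unfold Spec_resolve_collision; infer_instance

-- ===== CLAIM (what is proved, stated in full; the proofs are below) =====
def Claim_equal_resolve_collision : Prop := ∀ (tokens : List String), Dom_resolve_collision tokens → Spec_resolve_collision tokens (resolve_collision tokens)

-- ===== LEMMAS AND PROOFS =====

-- A's per-index keep test.
def pvKeepA (tokens : List String) (i : Int) : Bool :=
  (PySem.List.pyRange 0 (tokens.length : Int)).all (fun j =>
    decide (i = j) ||
    !(PySem.Str.startswith (PySem.List.pyGetD tokens j "") (PySem.List.pyGetD tokens i "")))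

-- B's sorted index order and per-position keep test.
def pvOrd (tokens : List String) : List Int :=
  PySem.List.sorted (PySem.List.pyRange 0 (tokens.length : Int)) (fun i => PySem.List.pyGetD tokens i "")

def pvKeepB (tokens : List String) (k : Int) : Bool :=
  !(decide (k + 1 < (tokens.length : Int)) &&
      PySem.Str.startswith
        (PySem.List.pyGetD tokens (PySem.List.pyGetD (pvOrd tokens) (k + 1) 0) "")
        (PySem.List.pyGetD tokens (PySem.List.pyGetD (pvOrd tokens) k 0) "")) &&
  !(decide (0 < k) &&
      decide (PySem.List.pyGetD tokens (PySem.List.pyGetD (pvOrd tokens) (k - 1) 0) ""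
        = PySem.List.pyGetD tokens (PySem.List.pyGetD (pvOrd tokens) k 0) ""))

lemma resolve_collision_eq_filter (tokens : List String) :
    resolve_collision tokens
      = (PySem.List.pyRange 0 (tokens.length : Int)).filter (pvKeepA tokens) := by
  unfold resolve_collision
  have := PySem.List.foldl_append_if (pvKeepA tokens) (fun i => i)
    (PySem.List.pyRange 0 (tokens.length : Int)) []
  simpa [pvKeepA] using this

lemma resolve_collision_alt_eq (tokens : List String) :
    resolve_collision_alt tokens
      = PySem.List.sorted
          (((PySem.List.pyRange 0 (tokens.length : Int)).filter (pvKeepB tokens)).map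
            (fun k => PySem.List.pyGetD (pvOrd tokens) k 0))
          (fun x => x) := by
  unfold resolve_collision_alt
  show PySem.List.sorted _ _ = _
  congr 1
  have hbody : (fun (keep : List Int) (k : Int) =>
      if k + 1 < (tokens.length : Int) ∧ PySem.Str.startswith
            (PySem.List.pyGetD tokens (PySem.List.pyGetD (pvOrd tokens) (k + 1) 0) "")
            (PySem.List.pyGetD tokens (PySem.List.pyGetD (pvOrd tokens) k 0) "") = true then keep
      else if 0 < k ∧ PySem.List.pyGetD tokens (PySem.List.pyGetD (pvOrd tokens) (k - 1) 0) ""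
              = PySem.List.pyGetD tokens (PySem.List.pyGetD (pvOrd tokens) k 0) "" then keep
      else keep ++ [PySem.List.pyGetD (pvOrd tokens) k 0])
      = (fun keep k => if pvKeepB tokens k = true then keep ++ [(fun k => PySem.List.pyGetD (pvOrd tokens) k 0) k] else keep) := by
    funext keep k
    by_cases h1 : (k + 1 < (tokens.length : Int) ∧ PySem.Str.startswith
            (PySem.List.pyGetD tokens (PySem.List.pyGetD (pvOrd tokens) (k + 1) 0) "")
            (PySem.List.pyGetD tokens (PySem.List.pyGetD (pvOrd tokens) k 0) "") = true)
    · have hf : pvKeepB tokens k = false := by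
        unfold pvKeepB
        rw [decide_eq_true h1.1, h1.2]
        rfl
      rw [if_pos h1, if_neg (by rw [hf]; exact Bool.false_ne_true)]
    · by_cases h2 : (0 < k ∧ PySem.List.pyGetD tokens (PySem.List.pyGetD (pvOrd tokens) (k - 1) 0) ""
              = PySem.List.pyGetD tokens (PySem.List.pyGetD (pvOrd tokens) k 0) "")
      · have hf : pvKeepB tokens k = false := by
          unfold pvKeepB
          rw [decide_eq_true h2.1, decide_eq_true h2.2]
          simp
        rw [if_neg h1, if_pos h2, if_neg (by rw [hf]; exact Bool.false_ne_true)]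
      · have ht : pvKeepB tokens k = true := by
          have e1 : (decide (k + 1 < (tokens.length : Int)) && PySem.Str.startswith
              (PySem.List.pyGetD tokens (PySem.List.pyGetD (pvOrd tokens) (k + 1) 0) "")
              (PySem.List.pyGetD tokens (PySem.List.pyGetD (pvOrd tokens) k 0) "")) = false := by
            by_cases hc : k + 1 < (tokens.length : Int)
            · cases hsw : PySem.Str.startswith
                (PySem.List.pyGetD tokens (PySem.List.pyGetD (pvOrd tokens) (k + 1) 0) "")
                (PySem.List.pyGetD tokens (PySem.List.pyGetD (pvOrd tokens) k 0) "") with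
              | false => simp
              | true => exact absurd ⟨hc, hsw⟩ h1
            · simp [hc]
          have e2 : (decide (0 < k) && decide (PySem.List.pyGetD tokens (PySem.List.pyGetD (pvOrd tokens) (k - 1) 0) ""
              = PySem.List.pyGetD tokens (PySem.List.pyGetD (pvOrd tokens) k 0) "")) = false := by
            by_cases hc : 0 < k
            · have : ¬ (PySem.List.pyGetD tokens (PySem.List.pyGetD (pvOrd tokens) (k - 1) 0) ""
                = PySem.List.pyGetD tokens (PySem.List.pyGetD (pvOrd tokens) k 0) "") :=
                fun e => h2 ⟨hc, e⟩
              simp [this]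
            · simp [hc]
          unfold pvKeepB
          rw [e1, e2]
          rfl
        rw [if_neg h1, if_neg h2, if_pos ht]
  show List.foldl _ [] _ = _
  rw [show (PySem.List.sorted (PySem.List.pyRange 0 (tokens.length:Int)) (fun i => PySem.List.pyGetD tokens i "")) = pvOrd tokens from rfl]
  rw [hbody, PySem.List.foldl_append_if]
  simp

-- lexicographic facts on List Char
lemma pvLtSandwich (x y r : List Char) (hxy : x < y) (hyz : y < x ++ r) : x <+: y := by
  induction x generalizing y r with
  | nil => exact List.nil_prefix
  | cons a x' ih =>
    cases y with
    | nil => exact absurd hxy (List.not_lt_nil _)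
    | cons b y' =>
      rw [List.cons_append] at hyz
      rw [List.cons_lt_cons_iff] at hxy hyz
      rcases hxy with h1 | ⟨rfl, h1⟩
      · rcases hyz with h2 | ⟨rfl, h2⟩
        · exact absurd h1 (lt_asymm h2)
        · exact absurd h1 (lt_irrefl _)
      · rcases hyz with h2 | ⟨-, h2⟩
        · exact absurd h2 (lt_irrefl _)
        · exact (List.prefix_cons_inj a).mpr (ih y' r h1 h2)

lemma pvLexSandwich (x y r : List Char) (hxy : x ≤ y) (hyz : y ≤ x ++ r) : x <+: y := by
  rcases (Std.le_iff_lt_or_eq.mp hxy) with h1 | rfl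
  · rcases (Std.le_iff_lt_or_eq.mp hyz) with h2 | rfl
    · exact pvLtSandwich x y r h1 h2
    · exact List.prefix_append x r
  · exact List.prefix_refl x

lemma pvPrefixLt (x y : List Char) (h : x <+: y) (hne : x ≠ y) : x < y := by
  obtain ⟨r, rfl⟩ := h
  cases r with
  | nil => simp at hne
  | cons c r' =>
    clear hne
    induction x with
    | nil => exact List.nil_lt_cons c r'
    | cons a x' ih => exact (List.cons_lt_cons_iff).mpr (Or.inr ⟨rfl, ih⟩)

lemma pvPrefixAntisymm (x y : List Char) (hp : x <+: y) (hle : y ≤ x) : y = x := by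
  by_contra hne
  rcases (Std.le_iff_lt_or_eq.mp hle) with h2 | h2
  · exact absurd (pvPrefixLt x y hp (fun e => hne e.symm)) (lt_asymm h2)
  · exact hne h2

-- basic facts about the sorted index list
lemma pvLenRange (n : Nat) : (PySem.List.pyRange 0 (n : Int)).length = n := by
  rw [PySem.List.pyRange_zero_natCast]; simp

lemma pvLenOrd (tokens : List String) : (pvOrd tokens).length = tokens.length := by
  unfold pvOrd; rw [PySem.List.length_sorted, pvLenRange]

lemma pvMemOrd (tokens : List String) (i : Int) :
    i ∈ pvOrd tokens ↔ 0 ≤ i ∧ i < (tokens.length : Int) := by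
  unfold pvOrd; rw [PySem.List.mem_sorted, PySem.List.mem_pyRange_one]

lemma pvNodupOrd (tokens : List String) : (pvOrd tokens).Nodup :=
  ((PySem.List.sorted_perm _ _ _).nodup_iff).mpr (PySem.List.nodup_pyRange_one 0 _)

lemma pvOrdMono (tokens : List String) {p q : Nat} (hpq : p ≤ q) (hq : q < tokens.length) :
    PySem.List.pyGetD tokens ((pvOrd tokens)[p]'(by rw [pvLenOrd]; omega)) ""
      ≤ PySem.List.pyGetD tokens ((pvOrd tokens)[q]'(by rw [pvLenOrd]; omega)) "" := by
  have := PySem.List.key_sorted_getElem_mono (PySem.List.pyRange 0 (tokens.length : Int))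
    (fun i => PySem.List.pyGetD tokens i "") hpq
    (by rw [PySem.List.length_sorted, pvLenRange]; exact hq)
  simpa [pvOrd] using this

lemma pvStartswithFalse (s p : List Char) :
    (PySem.Chars.startswith s p = false) ↔ ¬ (p <+: s) := by
  rw [← PySem.Chars.startswith_iff]; simp

lemma pvKeepA_iff (tokens : List String) (i : Int) :
    pvKeepA tokens i = true ↔
      ∀ j : Int, 0 ≤ j → j < (tokens.length : Int) → j ≠ i →
        ¬ ((PySem.List.pyGetD tokens i "").toList <+: (PySem.List.pyGetD tokens j "").toList) := by
  simp only [pvKeepA, List.all_eq_true, PySem.List.mem_pyRange_one, Bool.or_eq_true,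
    Bool.not_eq_true', decide_eq_true_eq, PySem.Str.startswith_eq, pvStartswithFalse]
  constructor
  · intro h j h0 h1 hne
    rcases h j ⟨h0, h1⟩ with rfl | h
    · exact absurd rfl hne
    · exact h
  · intro h j hj
    by_cases e : i = j
    · exact Or.inl e
    · exact Or.inr (h j hj.1 hj.2 (fun hji => e hji.symm))

lemma pvKeepB_iff (tokens : List String) (k : Int) :
    pvKeepB tokens k = true ↔
      (¬ (k + 1 < (tokens.length : Int) ∧ PySem.Str.startswith
            (PySem.List.pyGetD tokens (PySem.List.pyGetD (pvOrd tokens) (k + 1) 0) "")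
            (PySem.List.pyGetD tokens (PySem.List.pyGetD (pvOrd tokens) k 0) "") = true)) ∧
      (¬ (0 < k ∧ PySem.List.pyGetD tokens (PySem.List.pyGetD (pvOrd tokens) (k - 1) 0) ""
            = PySem.List.pyGetD tokens (PySem.List.pyGetD (pvOrd tokens) k 0) "")) := by
  simp only [pvKeepB, Bool.and_eq_true, Bool.not_eq_true', Bool.and_eq_false_iff,
    decide_eq_false_iff_not]
  constructor
  · rintro ⟨ha, hb⟩
    constructor
    · rintro ⟨h1, h2⟩
      rcases ha with ha | ha
      · exact ha h1
      · rw [h2] at ha; simp at ha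
    · rintro ⟨h1, h2⟩
      rcases hb with hb | hb
      · exact hb h1
      · exact hb h2
  · rintro ⟨ha, hb⟩
    constructor
    · by_cases hc : k + 1 < (tokens.length : Int)
      · right
        cases hsw : PySem.Str.startswith
            (PySem.List.pyGetD tokens (PySem.List.pyGetD (pvOrd tokens) (k + 1) 0) "")
            (PySem.List.pyGetD tokens (PySem.List.pyGetD (pvOrd tokens) k 0) "") with
        | false => rfl
        | true => exact absurd ⟨hc, hsw⟩ ha
      · exact Or.inl hc
    · by_cases hc : 0 < k
      · exact Or.inr (fun e => hb ⟨hc, e⟩)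
      · exact Or.inl hc

lemma pvGetOrd (tokens : List String) (m : Nat) (hm : m < tokens.length) :
    PySem.List.pyGetD (pvOrd tokens) (m : Int) 0
      = (pvOrd tokens)[m]'(by rw [pvLenOrd]; exact hm) := by
  rw [PySem.List.pyGetD_eq_getElem (pvOrd tokens) 0 (by positivity)
    (by rw [pvLenOrd]; exact_mod_cast hm)]
  simp

lemma pvSurjOrd (tokens : List String) (j : Int) (h0 : 0 ≤ j) (h1 : j < (tokens.length : Int)) :
    ∃ (m : Nat) (hm : m < tokens.length), (pvOrd tokens)[m]'(by rw [pvLenOrd]; exact hm) = j := by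
  have hmem : j ∈ pvOrd tokens := (pvMemOrd tokens j).mpr ⟨h0, h1⟩
  obtain ⟨m, hm, he⟩ := List.mem_iff_getElem.mp hmem
  rw [pvLenOrd] at hm
  exact ⟨m, hm, he⟩

-- elements of the order list are valid indices
lemma pvOrdElem (tokens : List String) (m : Nat) (hm : m < tokens.length) :
    0 ≤ (pvOrd tokens)[m]'(by rw [pvLenOrd]; exact hm) ∧
    (pvOrd tokens)[m]'(by rw [pvLenOrd]; exact hm) < (tokens.length : Int) := by
  have : (pvOrd tokens)[m]'(by rw [pvLenOrd]; exact hm) ∈ pvOrd tokens := List.getElem_mem _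
  exact (pvMemOrd tokens _).mp this

-- THE HEART: B's neighbour test at sorted position k agrees with A's global test on order[k].
lemma pvKeepB_eq_keepA (tokens : List String) (k : Nat) (hk : k < tokens.length) :
    pvKeepB tokens (k : Int)
      = pvKeepA tokens ((pvOrd tokens)[k]'(by rw [pvLenOrd]; exact hk)) := by
  have hBiff := pvKeepB_iff tokens (k : Int)
  have hAiff := pvKeepA_iff tokens ((pvOrd tokens)[k]'(by rw [pvLenOrd]; exact hk))
  have hgetk : PySem.List.pyGetD (pvOrd tokens) (k : Int) 0
      = (pvOrd tokens)[k]'(by rw [pvLenOrd]; exact hk) := pvGetOrd tokens k hk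
  rw [Bool.eq_iff_iff, hBiff, hAiff]
  constructor
  · -- B keeps ⇒ A keeps
    rintro ⟨hc1, hc2⟩ j h0 h1 hne hpre
    obtain ⟨m, hm, hme⟩ := pvSurjOrd tokens j h0 h1
    have hmk : m ≠ k := by
      intro e; subst e; exact hne (hme ▸ rfl)
    rcases Nat.lt_or_ge k m with hkm | hmk'
    · -- j is after k in sorted order: the successor of k already extends tokens[order[k]]
      have hk1 : k + 1 < tokens.length := by omega
      apply hc1
      refine ⟨by exact_mod_cast hk1, ?_⟩
      rw [show (k : Int) + 1 = ((k + 1 : Nat) : Int) by push_cast; ring,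
        pvGetOrd tokens (k + 1) hk1, hgetk, PySem.Str.startswith_eq,
        PySem.Chars.startswith_iff]
      -- sandwich: g ord[k] ≤ g ord[k+1] ≤ g ord[m] and g ord[k] <+: g ord[m]
      have hle1 := pvOrdMono tokens (Nat.le_succ k) hk1
      have hle2 := pvOrdMono tokens (show k + 1 ≤ m by omega) hm
      rw [hme] at hle2
      obtain ⟨r, hr⟩ := hpre
      apply pvLexSandwich _ _ r (String.le_iff_toList_le.mp hle1)
      rw [hr]
      exact String.le_iff_toList_le.mp hle2
    · -- j is before k: tokens[order[j-pos]] = tokens[order[k]], so the predecessor equals it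
      have hmk2 : m < k := by omega
      have hk0 : 0 < k := by omega
      -- from prefix + order: tokens at m equals tokens at k
      have hlemk := pvOrdMono tokens (show m ≤ k by omega) hk
      rw [hme] at hlemk
      have heq : (PySem.List.pyGetD tokens j "").toList
          = (PySem.List.pyGetD tokens ((pvOrd tokens)[k]'(by rw [pvLenOrd]; exact hk)) "").toList :=
        pvPrefixAntisymm _ _ hpre (String.le_iff_toList_le.mp hlemk)
      have heqS : PySem.List.pyGetD tokens j ""
          = PySem.List.pyGetD tokens ((pvOrd tokens)[k]'(by rw [pvLenOrd]; exact hk)) "" :=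
        String.toList_inj.mp heq
      apply hc2
      refine ⟨by exact_mod_cast hk0, ?_⟩
      rw [show (k : Int) - 1 = ((k - 1 : Nat) : Int) by omega,
        pvGetOrd tokens (k - 1) (by omega), hgetk]
      -- g ord[m] ≤ g ord[k-1] ≤ g ord[k] = g ord[m] ⇒ equality
      have h1' := pvOrdMono tokens (show m ≤ k - 1 by omega) (show k - 1 < tokens.length by omega)
      have h2' := pvOrdMono tokens (show k - 1 ≤ k by omega) hk
      rw [hme] at h1'
      rw [heqS] at h1'
      exact le_antisymm h2' h1'
  · -- A keeps ⇒ B keeps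
    rintro hA
    constructor
    · rintro ⟨hk1, hsw⟩
      have hk1' : k + 1 < tokens.length := by exact_mod_cast hk1
      rw [show (k : Int) + 1 = ((k + 1 : Nat) : Int) by push_cast; ring,
        pvGetOrd tokens (k + 1) hk1', hgetk, PySem.Str.startswith_eq,
        PySem.Chars.startswith_iff] at hsw
      have hne : (pvOrd tokens)[k + 1]'(by rw [pvLenOrd]; exact hk1')
          ≠ (pvOrd tokens)[k]'(by rw [pvLenOrd]; exact hk) := by
        rw [Ne, (pvNodupOrd tokens).getElem_inj_iff]
        omega
      exact hA _ (pvOrdElem tokens (k + 1) hk1').1 (pvOrdElem tokens (k + 1) hk1').2 hne hsw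
    · rintro ⟨hk0, heq⟩
      have hk0' : 0 < k := by exact_mod_cast hk0
      rw [show (k : Int) - 1 = ((k - 1 : Nat) : Int) by omega,
        pvGetOrd tokens (k - 1) (by omega), hgetk] at heq
      have hne : (pvOrd tokens)[k - 1]'(by rw [pvLenOrd]; omega)
          ≠ (pvOrd tokens)[k]'(by rw [pvLenOrd]; exact hk) := by
        rw [Ne, (pvNodupOrd tokens).getElem_inj_iff]
        omega
      exact hA _ (pvOrdElem tokens (k - 1) (by omega)).1 (pvOrdElem tokens (k - 1) (by omega)).2 hne
        (by rw [heq])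

-- membership in the two kept lists coincides
lemma pvMemEquiv (tokens : List String) (x : Int) :
    x ∈ (PySem.List.pyRange 0 (tokens.length : Int)).filter (pvKeepA tokens) ↔
    x ∈ ((PySem.List.pyRange 0 (tokens.length : Int)).filter (pvKeepB tokens)).map
          (fun k => PySem.List.pyGetD (pvOrd tokens) k 0) := by
  rw [List.mem_filter, List.mem_map, PySem.List.mem_pyRange_one]
  constructor
  · rintro ⟨⟨h0, h1⟩, hA⟩
    obtain ⟨m, hm, hme⟩ := pvSurjOrd tokens x h0 h1
    refine ⟨(m : Int), ?_, ?_⟩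
    · rw [List.mem_filter, PySem.List.mem_pyRange_one]
      refine ⟨⟨by positivity, by exact_mod_cast hm⟩, ?_⟩
      rw [pvKeepB_eq_keepA tokens m hm, hme]
      exact hA
    · rw [pvGetOrd tokens m hm, hme]
  · rintro ⟨kI, hkI, hx⟩
    rw [List.mem_filter, PySem.List.mem_pyRange_one] at hkI
    obtain ⟨⟨h0, h1⟩, hB⟩ := hkI
    obtain ⟨m, rfl⟩ : ∃ m : Nat, kI = (m : Int) := ⟨kI.toNat, by omega⟩
    have hm : m < tokens.length := by exact_mod_cast h1
    rw [pvGetOrd tokens m hm] at hx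
    rw [pvKeepB_eq_keepA tokens m hm] at hB
    subst hx
    exact ⟨(pvOrdElem tokens m hm), hB⟩

theorem resolve_collision_spec : Claim_equal_resolve_collision := by
  intro tokens _
  unfold Spec_resolve_collision
  rw [resolve_collision_eq_filter, resolve_collision_alt_eq]
  have hpair : ((PySem.List.pyRange 0 (tokens.length : Int)).filter (pvKeepA tokens)).Pairwise
      (fun a b => a < b) := (PySem.List.pairwise_lt_pyRange_one 0 _).filter _
  have hnodA : ((PySem.List.pyRange 0 (tokens.length : Int)).filter (pvKeepA tokens)).Nodup :=
    (PySem.List.nodup_pyRange_one 0 _).filter _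
  have hnodB : (((PySem.List.pyRange 0 (tokens.length : Int)).filter (pvKeepB tokens)).map
      (fun k => PySem.List.pyGetD (pvOrd tokens) k 0)).Nodup := by
    apply List.Nodup.map_on
    · intro a ha b hb he
      rw [List.mem_filter, PySem.List.mem_pyRange_one] at ha hb
      obtain ⟨ma, rfl⟩ : ∃ m : Nat, a = (m : Int) := ⟨a.toNat, by omega⟩
      obtain ⟨mb, rfl⟩ : ∃ m : Nat, b = (m : Int) := ⟨b.toNat, by omega⟩
      have hma : ma < tokens.length := by exact_mod_cast ha.1.2
      have hmb : mb < tokens.length := by exact_mod_cast hb.1.2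
      rw [pvGetOrd tokens ma hma, pvGetOrd tokens mb hmb,
        (pvNodupOrd tokens).getElem_inj_iff] at he
      exact_mod_cast he
    · exact (PySem.List.nodup_pyRange_one 0 _).filter _
  have hperm : ((PySem.List.pyRange 0 (tokens.length : Int)).filter (pvKeepA tokens)).Perm
      (((PySem.List.pyRange 0 (tokens.length : Int)).filter (pvKeepB tokens)).map
        (fun k => PySem.List.pyGetD (pvOrd tokens) k 0)) := by
    rw [List.perm_ext_iff_of_nodup hnodA hnodB]
    exact pvMemEquiv tokens
  exact (PySem.List.sorted_eq_of_perm_of_pairwise_lt _ _ _ hperm hpair).symm
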